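-- pv_equiv track=rewrite | github.com/boost-devs/coding-test-study | peacecheejecake/programmers/42860_조이스틱.py | solution
-- ===== SOURCE A (Python) =====
-- def num_to_correct(target):
--     target = ord(target)
--     return min(target - ord('A'), 1 + ord('Z') - target)
--
-- def solution(name):
--     vert = sum(map(num_to_correct, name))
--
--     a_chunks = []
--     idx = []
--     for i, c in enumerate(name):
--         if c == 'A':
--             if not idx:
--                 idx.append(i)
--             if i == len(name) - 1 or name[i + 1] != 'A':
--                 idx.append(i)
--                 a_chunks.append(idx)
--                 idx = []
--
--     horz = len(name) - 1
--     for s, e in a_chunks: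
--         if s == 0:
--             dist = len(name) - e - 1
--         elif e == len(name) - 1:
--             dist = s - 1
--         else:
--             dist = min(
--                 2 * (s - 1) + (len(name) - 1 - e),
--                 2 * (len(name) - 1 - e) + (s - 1),
--             )
--         horz = min(horz, dist)
--
--     return vert + horz
-- ===== SOURCE B (Python) =====
-- def solution(name):
--     # Position scan: for every index i, skip the 'A'-stretch after it and take the
--     # uniform turn-around cost i + (n - nxt) + min(i, n - nxt); no run list, no case split.
--     n = len(name)
--     vert = sum(min(ord(c) - 65, 91 - ord(c)) for c in name)
--     horz = n - 1
--     for i in range(n):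
--         nxt = i + 1
--         while nxt < n and name[nxt] == 'A':
--             nxt += 1
--         horz = min(horz, i + (n - nxt) + min(i, n - nxt))
--     return vert + horz
-- ===== Notes on version B (the rewrite author's own statement) =====
-- stated objective: idiomatic
-- what changed: A precomputes a list of maximal 'A'-run chunks (stateful idx buffer + lookahead) and minimizes a three-case per-run distance formula over that list; B is the canonical solution: for every position i it skips the 'A'-stretch after i on the fly and takes the uniform cost i + (n - nxt) + min(i, n - nxt), with no run list and no case analysis.
import Mathlib
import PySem

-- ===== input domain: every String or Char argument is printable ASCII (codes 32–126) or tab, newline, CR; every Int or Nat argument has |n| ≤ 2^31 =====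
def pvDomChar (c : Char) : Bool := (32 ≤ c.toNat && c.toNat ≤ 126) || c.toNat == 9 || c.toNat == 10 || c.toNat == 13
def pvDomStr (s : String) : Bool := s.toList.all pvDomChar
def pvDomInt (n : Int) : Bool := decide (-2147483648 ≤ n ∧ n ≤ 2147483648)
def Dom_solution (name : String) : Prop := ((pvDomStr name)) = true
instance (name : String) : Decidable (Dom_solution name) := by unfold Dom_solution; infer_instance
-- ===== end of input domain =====

-- B replaces A's chunk-list precomputation and three-case per-run distance by the canonical
-- position scan with the uniform cost i + (n - nxt) + min(i, n - nxt) (objective: idiomatic).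

-- ===== PORT A =====
def numToCorrect (c : Char) : Int :=
  min ((c.toNat : Int) - 65) (1 + 90 - (c.toNat : Int))

-- loop body of A's chunk-collecting for-loop (state = (idx, a_chunks))
def chunkStep (cs : List Char) (st : List Int × List (List Int)) (ic : Int × Char) :
    List Int × List (List Int) :=
  let idx := st.1
  let chunks := st.2
  let i := ic.1
  let c := ic.2
  if c = 'A' then
    let idx := if idx = [] then idx ++ [i] else idx
    if i = (cs.length : Int) - 1 ∨ PySem.List.pyGet? cs (i + 1) ≠ some 'A' then
      ([], chunks ++ [idx ++ [i]])
    else (idx, chunks)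
  else (idx, chunks)

def solution (name : String) : Int :=
  let cs := name.toList
  let n : Int := cs.length
  let vert := (cs.map numToCorrect).sum
  let final := (PySem.List.enumerate cs 0).foldl (chunkStep cs) ([], [])
  let horz := final.2.foldl
    (fun h ch =>
      match ch with
      | [s, e] =>
        min h (if s = 0 then n - e - 1
               else if e = n - 1 then s - 1
               else min (2*(s-1) + (n-1-e)) (2*(n-1-e) + (s-1)))
      | _ => h)  -- unreachable: every element of a_chunks is a two-element list
    (n - 1)
  vert + horz

-- ===== PORT B =====
-- B's inner while loop: first index j ≥ i with cs[j] ≠ 'A' (or the length)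
def skipA (cs : List Char) (i : Nat) : Nat :=
  if h : i < cs.length then
    if cs[i] = 'A' then skipA cs (i + 1) else i
  else i
termination_by cs.length - i

-- B's per-position candidate cost: nxt = end of the 'A'-stretch after i, then turn-around cost
def costB (cs : List Char) (i : Int) : Int :=
  let nxt : Int := skipA cs (i.toNat + 1)
  i + ((cs.length : Int) - nxt) + min i ((cs.length : Int) - nxt)

def solution_alt (name : String) : Int :=
  let cs := name.toList
  let n : Int := cs.length
  let vert := (cs.map (fun c => min ((c.toNat : Int) - 65) (91 - (c.toNat : Int)))).sum
  let horz := (PySem.List.pyRange 0 n 1).foldl (fun h i => min h (costB cs i)) (n - 1)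
  vert + horz

-- ===== PRECONDITION & SPEC =====
def Spec_solution (name : String) (out : Int) : Prop := out = solution_alt name
instance (name : String) (out : Int) : Decidable (Spec_solution name out) := by unfold Spec_solution; infer_instance

-- ===== CLAIM (what is proved, stated in full; the proofs are below) =====
def Claim_equal_solution : Prop := ∀ (name : String), Dom_solution name → Spec_solution name (solution name)

-- ===== LEMMAS AND PROOFS =====

-- A's distance formula for a run (s, e), as a function of the pair
def distA (n : Int) (p : Int × Int) : Int :=
  if p.1 = 0 then n - p.2 - 1
  else if p.2 = n - 1 then p.1 - 1
  else min (2*(p.1-1) + (n-1-p.2)) (2*(n-1-p.2) + (p.1-1))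

theorem skipA_ge_aux (cs : List Char) : ∀ (k i : Nat), cs.length ≤ i + k → i ≤ skipA cs i := by
  intro k
  induction k with
  | zero =>
    intro i hk
    rw [skipA]
    simp [show ¬ i < cs.length by omega]
  | succ k ih =>
    intro i hk
    rw [skipA]
    by_cases h : i < cs.length
    · by_cases hA : cs[i] = 'A'
      · simp only [h, hA, dite_true, if_true]
        have := ih (i + 1) (by omega)
        omega
      · simp [h, hA]
    · simp [h]

theorem skipA_ge (cs : List Char) (i : Nat) : i ≤ skipA cs i :=
  skipA_ge_aux cs cs.length i (by omega)

theorem skipA_gt (cs : List Char) (i : Nat) (h : i < cs.length) (hA : cs[i] = 'A') :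
    i < skipA cs i := by
  rw [skipA]; simp only [h, hA, dite_true, if_true]
  have := skipA_ge cs (i + 1); omega

theorem skipA_le_aux (cs : List Char) : ∀ (k i : Nat), cs.length ≤ i + k → i ≤ cs.length →
    skipA cs i ≤ cs.length := by
  intro k
  induction k with
  | zero =>
    intro i hk hi
    rw [skipA]
    simp [show ¬ i < cs.length by omega, hi]
  | succ k ih =>
    intro i hk hi
    rw [skipA]
    by_cases h : i < cs.length
    · by_cases hA : cs[i] = 'A'
      · simp only [h, hA, dite_true, if_true]
        exact ih (i + 1) (by omega) (by omega)
      · simp [h, hA]; omega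
    · simp [h, hi]

theorem skipA_le (cs : List Char) (i : Nat) (hi : i ≤ cs.length) : skipA cs i ≤ cs.length :=
  skipA_le_aux cs cs.length i (by omega) hi

theorem skipA_eq_self_iff (cs : List Char) (i : Nat) :
    skipA cs i = i ↔ ¬ (i < cs.length ∧ cs[i]? = some 'A') := by
  rw [skipA]
  by_cases h : i < cs.length
  · by_cases hA : cs[i] = 'A'
    · have hge := skipA_ge cs (i + 1)
      have hne : skipA cs (i + 1) ≠ i := by omega
      simp [h, hA, hne]
    · simp [h, hA]
  · simp [h]

theorem skipA_succ (cs : List Char) (i : Nat) (h : i < cs.length) (hA : cs[i] = 'A') :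
    skipA cs i = skipA cs (i + 1) := by
  rw [skipA]; simp [h, hA]

-- inside the stretch, skipping from any point reaches the same end
theorem skipA_within_aux (cs : List Char) : ∀ (k s j : Nat), j ≤ s + k → s ≤ j → j ≤ skipA cs s →
    skipA cs j = skipA cs s := by
  intro k
  induction k with
  | zero =>
    intro s j hk hsj _
    have : j = s := by omega
    rw [this]
  | succ k ih =>
    intro s j hk hsj hle
    by_cases hEq : j = s
    · rw [hEq]
    · have hlt : s < j := by omega
      have hgt : s < skipA cs s := by omega
      have hs : s < cs.length ∧ cs[s]? = some 'A' := by
        by_contra hc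
        have := (skipA_eq_self_iff cs s).mpr hc
        omega
      have hA : cs[s] = 'A' := by
        have := hs.2
        rwa [List.getElem?_eq_getElem hs.1, Option.some_inj] at this
      have hstep : skipA cs s = skipA cs (s + 1) := skipA_succ cs s hs.1 hA
      have hrec := ih (s + 1) j (by omega) (by omega) (by rw [← hstep]; exact hle)
      rw [hrec, ← hstep]

theorem skipA_within (cs : List Char) (s j : Nat) (hsj : s ≤ j) (hle : j ≤ skipA cs s) :
    skipA cs j = skipA cs s :=
  skipA_within_aux cs (j - s) s j (by omega) hsj hle

-- the list of 'A'-runs (start, end) from position i, as Int pairs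
def runsFrom (cs : List Char) (i : Nat) : List (Int × Int) :=
  if h : i < cs.length then
    if hA : cs[i] = 'A' then
      ((i : Int), (skipA cs i : Int) - 1) :: runsFrom cs (skipA cs i)
    else runsFrom cs (i + 1)
  else []
termination_by cs.length - i
decreasing_by
  · have := skipA_gt cs i h hA; omega
  · omega

theorem runsFrom_end (cs : List Char) (i : Nat) (h : ¬ i < cs.length) :
    runsFrom cs i = [] := by
  rw [runsFrom]; simp [h]

theorem runsFrom_pos_A (cs : List Char) (i : Nat) (h : i < cs.length) (hA : cs[i] = 'A') :
    runsFrom cs i = ((i : Int), (skipA cs i : Int) - 1) :: runsFrom cs (skipA cs i) := by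
  rw [runsFrom]; simp [h, hA]

theorem runsFrom_pos_notA (cs : List Char) (i : Nat) (h : i < cs.length) (hA : ¬ cs[i] = 'A') :
    runsFrom cs i = runsFrom cs (i + 1) := by
  rw [runsFrom]; simp [h, hA]

-- every emitted run is ((s), skipA s - 1) with cs[s] = 'A'
theorem runsFrom_shape (cs : List Char) : ∀ (k t : Nat), cs.length ≤ t + k →
    ∀ p ∈ runsFrom cs t, ∃ s : Nat, p = ((s : Int), (skipA cs s : Int) - 1) ∧
      t ≤ s ∧ s < cs.length ∧ cs[s]? = some 'A' := by
  intro k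
  induction k with
  | zero =>
    intro t hk p hp
    rw [runsFrom_end cs t (by omega)] at hp
    exact absurd hp (List.not_mem_nil)
  | succ k ih =>
    intro t hk p hp
    by_cases h : t < cs.length
    · by_cases hA : cs[t] = 'A'
      · rw [runsFrom_pos_A cs t h hA] at hp
        rcases List.mem_cons.mp hp with heq | htail
        · exact ⟨t, heq, le_refl t, h, by rw [List.getElem?_eq_getElem h, hA]⟩
        · have hgt := skipA_gt cs t h hA
          obtain ⟨s, h1, h2, h3, h4⟩ := ih (skipA cs t) (by omega) p htail
          exact ⟨s, h1, by omega, h3, h4⟩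
      · rw [runsFrom_pos_notA cs t h hA] at hp
        obtain ⟨s, h1, h2, h3, h4⟩ := ih (t + 1) (by omega) p hp
        exact ⟨s, h1, by omega, h3, h4⟩
    · rw [runsFrom_end cs t h] at hp
      exact absurd hp (List.not_mem_nil)

-- every 'A'-position j ≥ t is covered by some emitted run
theorem runsFrom_cover (cs : List Char) : ∀ (k t : Nat), cs.length ≤ t + k →
    ∀ j : Nat, t ≤ j → j < cs.length → cs[j]? = some 'A' →
      ∃ s : Nat, ((s : Int), (skipA cs s : Int) - 1) ∈ runsFrom cs t ∧
        s ≤ j ∧ j < skipA cs s := by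
  intro k
  induction k with
  | zero => intro t hk j htj hj _; omega
  | succ k ih =>
    intro t hk j htj hj hjA
    have ht : t < cs.length := by omega
    by_cases hA : cs[t] = 'A'
    · have hgt := skipA_gt cs t ht hA
      by_cases hcov : j < skipA cs t
      · exact ⟨t, by rw [runsFrom_pos_A cs t ht hA]; exact List.mem_cons_self, htj, hcov⟩
      · obtain ⟨s, h1, h2, h3⟩ := ih (skipA cs t) (by omega) j (by omega) hj hjA
        exact ⟨s, by rw [runsFrom_pos_A cs t ht hA]; exact List.mem_cons_of_mem _ h1, h2, h3⟩
    · have hne : t ≠ j := by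
        intro hEq
        apply hA
        have := hjA
        rw [← hEq, List.getElem?_eq_getElem ht, Option.some_inj] at this
        exact this
      obtain ⟨s, h1, h2, h3⟩ := ih (t + 1) (by omega) j (by omega) hj hjA
      exact ⟨s, by rw [runsFrom_pos_notA cs t ht hA]; exact h1, h2, h3⟩

-- generic facts about a fold that keeps the running minimum of f over a list
theorem foldlMin_le_init {α : Type} (f : α → Int) (L : List α) : ∀ (a : Int),
    L.foldl (fun h x => min h (f x)) a ≤ a := by
  induction L with
  | nil => intro a; simp
  | cons x l ih =>
    intro a
    simp only [List.foldl_cons]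
    exact le_trans (ih (min a (f x))) (min_le_left _ _)

theorem foldlMin_le_mem {α : Type} (f : α → Int) (L : List α) : ∀ (a : Int) (x : α), x ∈ L →
    L.foldl (fun h x => min h (f x)) a ≤ f x := by
  induction L with
  | nil => intro a x hx; exact absurd hx (List.not_mem_nil)
  | cons y l ih =>
    intro a x hx
    simp only [List.foldl_cons]
    rcases List.mem_cons.mp hx with heq | hmem
    · subst heq
      exact le_trans (foldlMin_le_init f l _) (min_le_right _ _)
    · exact ih _ x hmem

theorem foldlMin_cases {α : Type} (f : α → Int) (L : List α) : ∀ (a : Int),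
    L.foldl (fun h x => min h (f x)) a = a ∨ ∃ x ∈ L, L.foldl (fun h x => min h (f x)) a = f x := by
  induction L with
  | nil => intro a; left; rfl
  | cons y l ih =>
    intro a
    simp only [List.foldl_cons]
    rcases ih (min a (f y)) with h | ⟨x, hx, hv⟩
    · rcases min_cases a (f y) with ⟨hm, _⟩ | ⟨hm, _⟩
      · left; rw [h, hm]
      · right; exact ⟨y, List.mem_cons_self, by rw [h, hm]⟩
    · right; exact ⟨x, List.mem_cons_of_mem _ hx, hv⟩

-- the A-side chunk fold produces exactly the runs (from the previous machinery)
def enumFrom (cs : List Char) (i : Nat) : List (Int × Char) :=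
  PySem.List.enumerate (cs.drop i) i

theorem enumFrom_zero (cs : List Char) : PySem.List.enumerate cs 0 = enumFrom cs 0 := by
  simp [enumFrom]

theorem enumFrom_step (cs : List Char) (i : Nat) (h : i < cs.length) :
    enumFrom cs i = ((i : Int), cs[i]) :: enumFrom cs (i + 1) := by
  unfold enumFrom
  rw [List.drop_eq_getElem_cons h, PySem.List.enumerate_cons]
  norm_num

theorem enumFrom_end (cs : List Char) (i : Nat) (h : ¬ i < cs.length) :
    enumFrom cs i = [] := by
  unfold enumFrom
  rw [List.drop_eq_nil_of_le (by omega), PySem.List.enumerate_nil]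

theorem closure_iff (cs : List Char) (i : Nat) (h : i < cs.length) :
    (((i : Int) = (cs.length : Int) - 1) ∨ PySem.List.pyGet? cs ((i : Int) + 1) ≠ some 'A')
      ↔ skipA cs (i + 1) = i + 1 := by
  rw [skipA_eq_self_iff]
  have hcast : ((i : Int) + 1) = ((i + 1 : Nat) : Int) := by push_cast; ring
  rw [hcast, PySem.List.pyGet?_natCast]
  constructor
  · rintro (h1 | h1) ⟨h2, h3⟩
    · omega
    · exact h1 h3
  · intro hn
    by_cases h2 : i + 1 < cs.length
    · right; intro h3; exact hn ⟨h2, h3⟩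
    · left; omega

theorem not_closure_next (cs : List Char) (i : Nat) (hcl : ¬ skipA cs (i + 1) = i + 1) :
    (i + 1 < cs.length ∧ cs[i + 1]? = some 'A') := by
  by_contra hc
  exact hcl ((skipA_eq_self_iff cs (i + 1)).mpr hc)

theorem foldA_main (cs : List Char) :
    ∀ (k i : Nat), cs.length ≤ i + k →
      (∀ (chunks : List (List Int)),
        List.foldl (chunkStep cs) (([] : List Int), chunks) (enumFrom cs i)
          = ([], chunks ++ (runsFrom cs i).map (fun p => [p.1, p.2])))
      ∧ (∀ (h : i < cs.length), cs[i] = 'A' → ∀ (s : Int) (chunks : List (List Int)),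
          List.foldl (chunkStep cs) ([s], chunks) (enumFrom cs i)
            = ([], chunks ++ ([s, (skipA cs i : Int) - 1]
                :: (runsFrom cs (skipA cs i)).map (fun p => [p.1, p.2])))) := by
  intro k
  induction k with
  | zero =>
    intro i hk
    have hi : ¬ i < cs.length := by omega
    refine ⟨fun chunks => ?_, fun h => absurd h hi⟩
    rw [enumFrom_end cs i hi, runsFrom_end cs i hi]
    simp
  | succ k ih =>
    intro i hk
    by_cases hi : i < cs.length
    · have ihh := ih (i + 1) (by omega)
      constructor
      · intro chunks
        rw [enumFrom_step cs i hi, List.foldl_cons]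
        by_cases hA : cs[i] = 'A'
        · by_cases hcl : skipA cs (i + 1) = i + 1
          · have hcond := (closure_iff cs i hi).mpr hcl
            have hstep : chunkStep cs ([], chunks) ((i : Int), cs[i])
                = ([], chunks ++ [[(i : Int), (i : Int)]]) := by
              unfold chunkStep
              simp only [hA, if_true, List.nil_append]
              rw [if_pos hcond]
              simp
            rw [hstep, ihh.1]
            have hsk : skipA cs i = i + 1 := by rw [skipA_succ cs i hi hA, hcl]
            rw [runsFrom_pos_A cs i hi hA, hsk]
            have he : ((i + 1 : Nat) : Int) - 1 = (i : Int) := by push_cast; ring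
            rw [List.map_cons, he]
            simp
          · have hcond : ¬ (((i : Int) = (cs.length : Int) - 1) ∨ PySem.List.pyGet? cs ((i : Int) + 1) ≠ some 'A') :=
              fun hc => hcl ((closure_iff cs i hi).mp hc)
            have hnx := not_closure_next cs i hcl
            have hA' : cs[i + 1] = 'A' := by
              have := hnx.2
              rwa [List.getElem?_eq_getElem hnx.1, Option.some_inj] at this
            have hstep : chunkStep cs ([], chunks) ((i : Int), cs[i])
                = ([(i : Int)], chunks) := by
              unfold chunkStep
              simp only [hA, if_true, List.nil_append]
              rw [if_neg hcond]
            rw [hstep, ihh.2 hnx.1 hA' (i : Int) chunks]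
            have hsk : skipA cs i = skipA cs (i + 1) := skipA_succ cs i hi hA
            rw [runsFrom_pos_A cs i hi hA, hsk]
            simp
        · have hstep : chunkStep cs ([], chunks) ((i : Int), cs[i]) = ([], chunks) := by
            unfold chunkStep
            simp [hA]
          rw [hstep, ihh.1, runsFrom_pos_notA cs i hi hA]
      · intro h hA s chunks
        rw [enumFrom_step cs i hi, List.foldl_cons]
        by_cases hcl : skipA cs (i + 1) = i + 1
        · have hcond := (closure_iff cs i hi).mpr hcl
          have hstep : chunkStep cs ([s], chunks) ((i : Int), cs[i])
              = ([], chunks ++ [[s, (i : Int)]]) := by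
            unfold chunkStep
            simp only [hA, if_true]
            rw [if_pos hcond]
            simp
          rw [hstep, ihh.1]
          have hsk : skipA cs i = i + 1 := by rw [skipA_succ cs i hi hA, hcl]
          rw [hsk]
          have he : ((i + 1 : Nat) : Int) - 1 = (i : Int) := by push_cast; ring
          rw [he]
          simp
        · have hcond : ¬ (((i : Int) = (cs.length : Int) - 1) ∨ PySem.List.pyGet? cs ((i : Int) + 1) ≠ some 'A') :=
            fun hc => hcl ((closure_iff cs i hi).mp hc)
          have hnx := not_closure_next cs i hcl
          have hA' : cs[i + 1] = 'A' := by
            have := hnx.2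
            rwa [List.getElem?_eq_getElem hnx.1, Option.some_inj] at this
          have hstep : chunkStep cs ([s], chunks) ((i : Int), cs[i]) = ([s], chunks) := by
            unfold chunkStep
            simp only [hA, if_true]
            rw [if_neg hcond]
            simp
          rw [hstep, ihh.2 hnx.1 hA' s chunks]
          have hsk : skipA cs i = skipA cs (i + 1) := skipA_succ cs i hi hA
          rw [hsk]
    · refine ⟨fun chunks => ?_, fun h => absurd h hi⟩
      rw [enumFrom_end cs i hi, runsFrom_end cs i hi]
      simp

-- A's fold over the chunk list is the min-fold of distA over the runs
theorem foldl_chunks (n : Int) (runs : List (Int × Int)) (a : Int) :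
    List.foldl
      (fun h ch =>
        match ch with
        | [s, e] =>
          min h (if s = 0 then n - e - 1
                 else if e = n - 1 then s - 1
                 else min (2*(s-1) + (n-1-e)) (2*(n-1-e) + (s-1)))
        | _ => h) a (runs.map (fun p => [p.1, p.2]))
      = List.foldl (fun h p => min h (distA n p)) a runs := by
  induction runs generalizing a with
  | nil => rfl
  | cons p l ih =>
    simp only [List.map_cons, List.foldl_cons]
    rw [ih]
    rfl

-- each run's distA is achieved by some position's costB
theorem costB_achieves (cs : List Char) (s : Nat) (hs : s < cs.length) (hA : cs[s]? = some 'A') :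
    ∃ i : Int, 0 ≤ i ∧ i < (cs.length : Int) ∧
      costB cs i ≤ distA (cs.length : Int) ((s : Int), (skipA cs s : Int) - 1) := by
  have hsA : cs[s] = 'A' := by rwa [List.getElem?_eq_getElem hs, Option.some_inj] at hA
  have hle := skipA_le cs s (by omega)
  have hgt := skipA_gt cs s hs hsA
  by_cases h0 : s = 0
  · subst h0
    refine ⟨0, le_refl 0, by omega, ?_⟩
    have hsk' : skipA cs ((0 : Int).toNat + 1) = skipA cs 0 := (skipA_succ cs 0 hs hsA).symm
    simp only [costB, distA, hsk', Nat.cast_zero, if_true]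
    omega
  · refine ⟨(s : Int) - 1, by omega, by omega, ?_⟩
    have htn : ((s : Int) - 1).toNat + 1 = s := by omega
    simp only [costB, distA]
    rw [htn]
    have hne : ((s : Int)) ≠ 0 := by omega
    rw [if_neg hne]
    by_cases hend : ((skipA cs s : Int) - 1) = (cs.length : Int) - 1
    · rw [if_pos hend]; omega
    · rw [if_neg hend]; omega

-- each position's costB is dominated by n-1 or by some run's distA
theorem costB_dominated (cs : List Char) (i : Int) (h0 : 0 ≤ i) (hn : i < (cs.length : Int)) :
    ((cs.length : Int) - 1 ≤ costB cs i) ∨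
    (∃ p ∈ runsFrom cs 0, distA (cs.length : Int) p ≤ costB cs i) := by
  set j : Nat := i.toNat + 1 with hj
  have hij : (j : Int) = i + 1 := by omega
  by_cases hfix : skipA cs j = j
  · left
    simp only [costB, ← hj, hfix]
    omega
  · right
    have hnx : j < cs.length ∧ cs[j]? = some 'A' := by
      by_contra hc
      exact hfix ((skipA_eq_self_iff cs j).mpr hc)
    obtain ⟨s, hmem, hsj, hjlt⟩ :=
      runsFrom_cover cs cs.length 0 (by omega) j (by omega) hnx.1 hnx.2
    refine ⟨((s : Int), (skipA cs s : Int) - 1), hmem, ?_⟩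
    have hskip : skipA cs j = skipA cs s := skipA_within cs s j hsj (by omega)
    have hle := skipA_le cs s (by omega)
    simp only [costB, ← hj, hskip, distA]
    by_cases hz : (s : Int) = 0
    · rw [if_pos hz]; omega
    · rw [if_neg hz]
      by_cases hend : ((skipA cs s : Int) - 1) = (cs.length : Int) - 1
      · rw [if_pos hend]; omega
      · rw [if_neg hend]; omega

-- the two horizontal minima agree
theorem horz_eq (cs : List Char) :
    (PySem.List.pyRange 0 (cs.length : Int) 1).foldl (fun h i => min h (costB cs i))
        ((cs.length : Int) - 1)
      = (runsFrom cs 0).foldl (fun h p => min h (distA (cs.length : Int) p))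
        ((cs.length : Int) - 1) := by
  set n : Int := (cs.length : Int) with hn
  apply le_antisymm
  · rcases foldlMin_cases (distA n) (runsFrom cs 0) (n - 1) with hcase | ⟨p, hp, hv⟩
    · rw [hcase]
      exact foldlMin_le_init _ _ _
    · rw [hv]
      obtain ⟨s, hps, _, hslen, hsA⟩ := runsFrom_shape cs cs.length 0 (by omega) p hp
      obtain ⟨i, hi0, hin, hcost⟩ := costB_achieves cs s hslen hsA
      calc _ ≤ costB cs i :=
              foldlMin_le_mem _ _ _ i (PySem.List.mem_pyRange_one.mpr ⟨hi0, hin⟩)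
        _ ≤ distA n p := by rw [hps]; exact hcost
  · rcases foldlMin_cases (costB cs) (PySem.List.pyRange 0 n 1) (n - 1) with hcase | ⟨i, hi, hv⟩
    · rw [hcase]
      exact foldlMin_le_init _ _ _
    · rw [hv]
      obtain ⟨hi0, hin⟩ := PySem.List.mem_pyRange_one.mp hi
      rcases costB_dominated cs i hi0 hin with hbig | ⟨p, hp, hd⟩
      · exact le_trans (foldlMin_le_init _ _ _) hbig
      · exact le_trans (foldlMin_le_mem _ _ _ p hp) hd

theorem solution_eq (name : String) : solution name = solution_alt name := by
  have hv : name.toList.map numToCorrect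
      = name.toList.map (fun c => min ((c.toNat : Int) - 65) (91 - (c.toNat : Int))) := by
    apply List.map_congr_left
    intro c _
    unfold numToCorrect
    norm_num
  have hfold := (foldA_main name.toList name.toList.length 0 (by omega)).1 []
  rw [← enumFrom_zero] at hfold
  simp only [solution, solution_alt]
  rw [hfold, hv, List.nil_append, foldl_chunks, ← horz_eq]

-- ===== VERDICT (by name: the statement is the Claim_ definition above) =====
theorem solution_spec : Claim_equal_solution := by
  intro name _
  unfold Spec_solution
  exact solution_eq name
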